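-- pv_equiv track=rewrite | github.com/Gachon-Vigilante/Retriever_Flask | utils.py | merge_parallel_unique
-- ===== SOURCE A (Python) =====
-- from collections import deque
--
-- def merge_parallel_unique(all_urls: dict[str, list[str]]) -> list[str]:
--     """
--         여러 개의 문자열 리스트를 병렬적으로 interleaving 순회하면서,
--         중복되지 않은 문자열만을 결과 리스트로 반환합니다.
--
--         각 리스트의 앞쪽부터 번갈아 가며 하나씩 값을 뽑고,
--         이미 등장한 문자열은 무시하고 새로운 문자열만 추가합니다.
--
--         :param all_urls: 문자열 리스트들을 값으로 가지는 딕셔너리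
--                          예: {"a": ["url1", "url2"], "b": ["url3", ...], ...}
--         :type all_urls: dict[str, list[str]]
--         :return: 중복되지 않은 문자열로 구성된 리스트
--         :rtype: list[str]
--     """
--     queues = [deque(lst) for lst in all_urls.values()] # deque된 Queue 객체를 여러 개 생성
--     seen_urls = set()
--     result = []
--
--     while any(queues): # 값이 있는 Queue가 하나라도 있다면 계속해서 순회
--         for queue in queues: # 모든 Queue에 대해서 각 Queue에서 데이터를 하나씩 순회하면서 뽑아서 저장(interleaving)
--             if queue: # Queue가 [], 즉 소진되지 않았을 경우에만 데이터 pop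
--                 url:str = queue.popleft()
--                 if url and url not in seen_urls:
--                     seen_urls.add(url)
--                     result.append(url)
--     return result
-- ===== SOURCE B (Python) =====
-- def merge_parallel_unique(all_urls: dict[str, list[str]]) -> list[str]:
--     # Transpose into position-buckets, then dedup the flattened buckets:
--     # bucket r holds the r-th element of every list (in dict order), so
--     # concatenating bucket 0, bucket 1, ... is exactly the interleaved order.
--     buckets: list[list[str]] = []
--     for lst in all_urls.values():
--         for r, url in enumerate(lst):
--             if r == len(buckets):
--                 buckets.append([])
--             buckets[r].append(url)
--     seen = set()
--     result = []
--     for bucket in buckets: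
--         for url in bucket:
--             if url and url not in seen:
--                 seen.add(url)
--                 result.append(url)
--     return result
-- ===== Notes on version B (the rewrite author's own statement) =====
-- stated objective: alternative
-- what changed: B has no queues and no round-robin while-loop: it transposes the lists once into position-buckets (bucket r = the r-th element of every list, in dict order) and then dedups the flattened buckets in a separate single pass, whereas A destructively pops one element per queue per round until every deque is exhausted.
import Mathlib
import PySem

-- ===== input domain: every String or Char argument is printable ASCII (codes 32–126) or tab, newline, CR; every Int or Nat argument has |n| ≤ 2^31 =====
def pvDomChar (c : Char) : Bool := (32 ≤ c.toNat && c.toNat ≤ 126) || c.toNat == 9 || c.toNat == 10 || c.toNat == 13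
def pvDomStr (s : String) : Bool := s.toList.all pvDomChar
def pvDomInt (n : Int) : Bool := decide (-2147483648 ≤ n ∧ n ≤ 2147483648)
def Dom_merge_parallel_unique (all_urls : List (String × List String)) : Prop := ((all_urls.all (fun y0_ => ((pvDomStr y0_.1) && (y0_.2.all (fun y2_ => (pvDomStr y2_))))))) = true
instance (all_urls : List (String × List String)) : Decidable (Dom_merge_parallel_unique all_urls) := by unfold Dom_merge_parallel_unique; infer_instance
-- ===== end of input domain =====

-- B replaces A's destructive round-robin over deques by a staged transpose: it buckets
-- every element by its position in its list, then dedups the flattened buckets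
-- (objective: alternative).
-- The fuel argument of A's loop port is only a totality guard: one round of the
-- while-loop strictly decreases the total number of queued elements, so the initial
-- fuel (total + 1) is never exhausted (proved in the lemmas below).

-- ===== PORT A =====
-- one body of A's inner `for queue in queues:` loop: pop the front of each non-empty
-- queue, record unseen non-empty urls; state = (queues after the pops, seen, result)
def pvStepA (acc : List (List String) × PySem.Set String × List String) (q : List String) :
    List (List String) × PySem.Set String × List String :=
  match q with
  | [] => (acc.1 ++ [([] : List String)], acc.2.1, acc.2.2)
  | url :: rest =>
      if (url != "") && !(PySem.Set.contains acc.2.1 url) then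
        (acc.1 ++ [rest], PySem.Set.add acc.2.1 url, acc.2.2 ++ [url])
      else
        (acc.1 ++ [rest], acc.2.1, acc.2.2)

-- one full `for queue in queues:` pass of A
def pvPassA (queues : List (List String)) (seen : PySem.Set String) (result : List String) :
    List (List String) × PySem.Set String × List String :=
  List.foldl pvStepA (([] : List (List String)), seen, result) queues

-- A's `while any(queues):` loop (fuel = totality guard only, see header comment)
def pvLoopA (fuel : Nat) (queues : List (List String)) (seen : PySem.Set String)
    (result : List String) : List String :=
  match fuel with
  | 0 => result
  | fuel + 1 =>
      if queues.any (fun q => !q.isEmpty) then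
        pvLoopA fuel (pvPassA queues seen result).1 (pvPassA queues seen result).2.1
          (pvPassA queues seen result).2.2
      else
        result

def merge_parallel_unique (all_urls : List (String × List String)) : List String :=
  -- queues = [deque(lst) for lst in all_urls.values()]
  pvLoopA (((((PySem.Dict.ofList all_urls).values.map (fun lst => lst))).map List.length).sum + 1)
    ((PySem.Dict.ofList all_urls).values.map (fun lst => lst)) PySem.Set.empty []

-- ===== PORT B =====
-- one body of B's inner `for r, url in enumerate(lst):` loop: extend the bucket list
-- when r is one past its end, then `buckets[r].append(url)`
def pvBStep (bs : List (List String)) (p : Int × String) : List (List String) :=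
  let bs := if p.1 == (bs.length : Int) then bs ++ [([] : List String)] else bs
  -- p.1 comes from enumerate, so p.1 ≥ 0 and `.toNat` is exact here
  bs.set p.1.toNat ((bs.getD p.1.toNat []) ++ [p.2])

-- one body of B's outer `for lst in all_urls.values():` loop
def pvAddList (buckets : List (List String)) (lst : List String) : List (List String) :=
  List.foldl pvBStep buckets (PySem.List.enumerate lst)

def merge_parallel_unique_alt (all_urls : List (String × List String)) : List String :=
  let buckets := List.foldl pvAddList [] (PySem.Dict.ofList all_urls).values
  -- for bucket in buckets: for url in bucket: if url and url not in seen: …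
  (List.foldl (fun acc bucket =>
      List.foldl (fun (acc : PySem.Set String × List String) url =>
        if (url != "") && !(PySem.Set.contains acc.1 url) then
          (PySem.Set.add acc.1 url, acc.2 ++ [url])
        else acc) acc bucket)
    (PySem.Set.empty, ([] : List String)) buckets).2

-- ===== PRECONDITION & SPEC =====
def Spec_merge_parallel_unique (all_urls : List (String × List String)) (out : List String) : Prop := out = merge_parallel_unique_alt all_urls
instance (all_urls : List (String × List String)) (out : List String) : Decidable (Spec_merge_parallel_unique all_urls out) := by unfold Spec_merge_parallel_unique; infer_instance

-- ===== CLAIM (what is proved, stated in full; the proofs are below) =====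
def Claim_equal_merge_parallel_unique : Prop := ∀ (all_urls : List (String × List String)), Dom_merge_parallel_unique all_urls → Spec_merge_parallel_unique all_urls (merge_parallel_unique all_urls)

-- ===== LEMMAS AND PROOFS =====

-- the dedup step shared by the two Pythons' `if url and url not in seen:` bodies
def pvDStep (acc : PySem.Set String × List String) (url : String) :
    PySem.Set String × List String :=
  if (url != "") && !(PySem.Set.contains acc.1 url) then
    (PySem.Set.add acc.1 url, acc.2 ++ [url])
  else acc

-- a pass of A strictly shrinks the total number of queued elements
theorem pvSumDrop_lt (queues : List (List String))
    (h : queues.any (fun q => !q.isEmpty) = true) :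
    ((queues.map (fun q => q.drop 1)).map List.length).sum < (queues.map List.length).sum := by
  induction queues with
  | nil => simp at h
  | cons q rest ih =>
      simp only [List.any_cons, Bool.or_eq_true] at h
      have hle : ((rest.map (fun q => q.drop 1)).map List.length).sum
          ≤ (rest.map List.length).sum := by
        clear ih h
        induction rest with
        | nil => simp
        | cons a b ihb =>
            simp only [List.map_cons, List.sum_cons]
            have := a.length_drop (i := 1)
            omega
      rcases h with h | h
      · have hq : q.length ≠ 0 := by cases q <;> simp_all
        simp only [List.map_cons, List.sum_cons, List.length_drop]
        omega
      · have := ih h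
        simp only [List.map_cons, List.sum_cons, List.length_drop]
        omega

-- canonical rounds of a queue family: row 0 = the heads of the non-empty queues,
-- then the rounds of the tails
def pvRowsRec (L : List (List String)) : List (List String) :=
  if h : L.any (fun q => !q.isEmpty) = true then
    L.filterMap List.head? :: pvRowsRec (L.map (fun q => q.drop 1))
  else []
termination_by (L.map List.length).sum
decreasing_by simpa using pvSumDrop_lt L h

-- zip-with-append with padding: what adding one list does to the bucket rows
def pvMerge : List (List String) → List String → List (List String)
  | bs, [] => bs
  | [], u :: l => [u] :: pvMerge [] l
  | b :: bs, u :: l => (b ++ [u]) :: pvMerge bs l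

-- a pass of A replaces each queue by its tail
theorem pvStepA_fst (queues qs : List (List String)) (s : PySem.Set String) (r : List String) :
    (List.foldl pvStepA (qs, s, r) queues).1 = qs ++ queues.map (fun q => q.drop 1) := by
  induction queues generalizing qs s r with
  | nil => simp
  | cons q rest ih =>
      match q with
      | [] =>
          simp only [List.foldl_cons, pvStepA]
          rw [ih]
          simp
      | url :: t =>
          simp only [List.foldl_cons, pvStepA]
          split <;> (rw [ih]; simp)

-- a pass of A dedups exactly the heads of the non-empty queues, in order
theorem pvStepA_snd (queues qs : List (List String)) (s : PySem.Set String) (r : List String) :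
    (List.foldl pvStepA (qs, s, r) queues).2
      = List.foldl pvDStep (s, r) (queues.filterMap List.head?) := by
  induction queues generalizing qs s r with
  | nil => simp
  | cons q rest ih =>
      match q with
      | [] =>
          simp only [List.foldl_cons, pvStepA, List.filterMap_cons]
          exact ih _ _ _
      | url :: t =>
          simp only [List.foldl_cons, pvStepA, List.filterMap_cons, List.head?_cons,
            List.foldl_cons, pvDStep]
          split <;> exact ih _ _ _

-- B's inner enumerate-fold, started at index r ≤ |bs|, appends the elements of l
-- into consecutive buckets from position r on (extending the bucket list as needed)
theorem pvBfold (l : List String) : ∀ (r : Nat) (bs : List (List String)), r ≤ bs.length →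
    List.foldl pvBStep bs (PySem.List.enumerate l (r : Int))
      = bs.take r ++ pvMerge (bs.drop r) l := by
  induction l with
  | nil => intro r bs _; simp [PySem.List.enumerate, pvMerge]
  | cons u l ih =>
      intro r bs hr
      rw [PySem.List.enumerate_cons, List.foldl_cons]
      have hcast : ((r : Int) + 1) = ((r + 1 : Nat) : Int) := by push_cast; ring
      by_cases h : r = bs.length
      · have hstep : pvBStep bs ((r : Int), u) = bs ++ [[u]] := by
          simp [pvBStep, h, List.getD]
        rw [hstep, hcast, ih (r + 1) (bs ++ [[u]]) (by simp [h])]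
        have t1 : bs.take (r + 1) = bs := List.take_of_length_le (by omega)
        have t2 : bs.drop r = [] := List.drop_eq_nil_of_le (by omega)
        have t3 : bs.take r = bs := List.take_of_length_le (by omega)
        rw [List.take_append, List.drop_append, t1, t2, t3]
        have : r + 1 - bs.length = 1 := by omega
        rw [this]
        have t4 : bs.drop (r + 1) = [] := List.drop_eq_nil_of_le (by omega)
        rw [t4]
        simp [pvMerge]
      · have hlt : r < bs.length := lt_of_le_of_ne hr h
        have hstep : pvBStep bs ((r : Int), u)
            = bs.take r ++ (bs[r] ++ [u]) :: bs.drop (r + 1) := by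
          have hne : ((r : Int) == (bs.length : Int)) = false := by
            simp only [beq_eq_false_iff_ne, ne_eq, Int.natCast_inj]; exact h
          simp only [pvBStep, hne, Bool.false_eq_true, if_false, Int.toNat_natCast,
            List.getD, List.getElem?_eq_getElem hlt, Option.getD_some]
          rw [List.set_eq_take_append_cons_drop, if_pos hlt]
        have hlenT : (bs.take r).length = r := by simp; omega
        rw [hstep, hcast, ih (r + 1) _ (by simp only [List.length_append, List.length_cons, hlenT]; omega)]
        have htake : (bs.take r ++ (bs[r] ++ [u]) :: bs.drop (r + 1)).take (r + 1)
            = bs.take r ++ [bs[r] ++ [u]] := by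
          rw [List.take_append, hlenT, List.take_of_length_le (by omega)]
          have : r + 1 - r = 1 := by omega
          rw [this]
          rfl
        have hdrop2 : (bs.take r ++ (bs[r] ++ [u]) :: bs.drop (r + 1)).drop (r + 1)
            = bs.drop (r + 1) := by
          rw [List.drop_append, hlenT, List.drop_eq_nil_of_le (by omega)]
          have : r + 1 - r = 1 := by omega
          rw [this]
          rfl
        rw [htake, hdrop2, List.drop_eq_getElem_cons hlt]
        simp [pvMerge]

-- hence one outer-loop body of B is pvMerge
theorem pvAddList_eq (bs : List (List String)) (l : List String) :
    pvAddList bs l = pvMerge bs l := by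
  have := pvBfold l 0 bs (Nat.zero_le _)
  simpa [pvAddList] using this

-- unfolding pvRowsRec once, in each branch
theorem pvRowsRec_pos (L : List (List String)) (h : L.any (fun q => !q.isEmpty) = true) :
    pvRowsRec L = L.filterMap List.head? :: pvRowsRec (L.map (fun q => q.drop 1)) := by
  rw [pvRowsRec]
  exact dif_pos h

theorem pvRowsRec_neg (L : List (List String)) (h : ¬ L.any (fun q => !q.isEmpty) = true) :
    pvRowsRec L = [] := by
  rw [pvRowsRec]
  exact dif_neg h

-- appending an empty list leaves the rounds unchanged
theorem pvRowsRec_append_nil : ∀ (n : Nat) (P : List (List String)),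
    (P.map List.length).sum ≤ n → pvRowsRec (P ++ [[]]) = pvRowsRec P := by
  intro n
  induction n with
  | zero =>
      intro P h
      have hne : ¬ P.any (fun q => !q.isEmpty) = true := by
        intro hc
        have := pvSumDrop_lt P hc
        omega
      have hne2 : ¬ (P ++ [[]]).any (fun q => !q.isEmpty) = true := by
        simpa [List.any_append] using hne
      rw [pvRowsRec_neg _ hne, pvRowsRec_neg _ hne2]
  | succ n ih =>
      intro P h
      by_cases hany : P.any (fun q => !q.isEmpty) = true
      · have hany2 : (P ++ [[]]).any (fun q => !q.isEmpty) = true := by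
          simp only [List.any_append]
          simp [hany]
        rw [pvRowsRec_pos _ hany, pvRowsRec_pos _ hany2]
        have hrow : List.filterMap List.head? (P ++ [[]]) = List.filterMap List.head? P := by
          simp [List.filterMap_append]
        have hmap : (P ++ [[]]).map (fun q : List String => q.drop 1)
            = P.map (fun q : List String => q.drop 1) ++ [[]] := by
          rw [List.map_append]
          rfl
        rw [hrow, hmap, ih _ (by have := pvSumDrop_lt P hany; omega)]
      · have hne2 : ¬ (P ++ [[]]).any (fun q => !q.isEmpty) = true := by
          simpa [List.any_append] using hany
        rw [pvRowsRec_neg _ hany, pvRowsRec_neg _ hne2]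

-- merging one more list into the rounds of P gives the rounds of P ++ [l]
theorem pvMerge_rowsRec (l : List String) : ∀ P : List (List String),
    pvMerge (pvRowsRec P) l = pvRowsRec (P ++ [l]) := by
  induction l with
  | nil =>
      intro P
      rw [show pvMerge (pvRowsRec P) [] = pvRowsRec P from by cases pvRowsRec P <;> rfl]
      exact (pvRowsRec_append_nil _ P (Nat.le_refl _)).symm
  | cons u l ih =>
      intro P
      have hany : ((P ++ [u :: l]).any (fun q => !q.isEmpty)) = true := by
        rw [List.any_append]
        simp
      have hmap : (P ++ [u :: l]).map (fun q : List String => q.drop 1)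
          = P.map (fun q : List String => q.drop 1) ++ [l] := by
        rw [List.map_append]
        rfl
      by_cases h : P.any (fun q => !q.isEmpty) = true
      · rw [pvRowsRec_pos _ h]
        rw [show pvMerge (List.filterMap List.head? P :: pvRowsRec (P.map (fun q => q.drop 1))) (u :: l)
            = (List.filterMap List.head? P ++ [u]) :: pvMerge (pvRowsRec (P.map (fun q => q.drop 1))) l from rfl]
        rw [ih (P.map (fun q => q.drop 1))]
        rw [pvRowsRec_pos _ hany, hmap]
        simp [List.filterMap_append]
      · have hempty : ∀ q ∈ P, q = [] := by
          intro q hq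
          by_contra hc
          exact h (List.any_eq_true.mpr ⟨q, hq, by cases q <;> simp_all⟩)
        have h2 : pvRowsRec (P.map (fun q => q.drop 1)) = [] := by
          apply pvRowsRec_neg
          intro hc
          rw [List.any_map, List.any_eq_true] at hc
          obtain ⟨q, hq, hq2⟩ := hc
          rw [hempty q hq] at hq2
          simp [Function.comp] at hq2
        have h3 : pvMerge ([] : List (List String)) l
            = pvRowsRec (P.map (fun q : List String => q.drop 1) ++ [l]) := by
          conv_lhs => rw [← h2]
          exact ih _
        rw [pvRowsRec_neg _ h]
        rw [show pvMerge ([] : List (List String)) (u :: l) = [u] :: pvMerge [] l from rfl]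
        rw [h3, pvRowsRec_pos _ hany, hmap]
        have hrow : List.filterMap List.head? (P ++ [u :: l]) = [u] := by
          rw [List.filterMap_append]
          have hnil : List.filterMap List.head? P = [] := by
            rw [List.filterMap_eq_nil_iff]
            intro q hq; rw [hempty q hq]; rfl
          simp [hnil]
        rw [hrow]

-- A's while-loop is the dedup fold over the flattened rounds
theorem pvLoopA_eq (fuel : Nat) : ∀ (L : List (List String)) (s : PySem.Set String)
    (r : List String), (L.map List.length).sum < fuel →
    pvLoopA fuel L s r = (List.foldl pvDStep (s, r) (pvRowsRec L).flatten).2 := by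
  induction fuel with
  | zero => intro L s r h; omega
  | succ fuel ih =>
      intro L s r h
      by_cases hany : L.any (fun q => !q.isEmpty) = true
      · rw [pvLoopA, if_pos hany]
        have h1 : (pvPassA L s r).1 = L.map (fun q => q.drop 1) := by
          simpa [pvPassA] using pvStepA_fst L [] s r
        have h2 : (pvPassA L s r).2 = List.foldl pvDStep (s, r) (L.filterMap List.head?) := by
          simpa [pvPassA] using pvStepA_snd L [] s r
        rw [h1, h2, ih _ _ _ (by have := pvSumDrop_lt L hany; omega)]
        rw [pvRowsRec_pos _ hany]
        rw [List.flatten_cons, List.foldl_append]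
      · rw [pvLoopA, if_neg hany, pvRowsRec_neg _ hany]
        rfl

-- B's bucket construction produces exactly the rounds
theorem pvBuckets_eq (V : List (List String)) :
    List.foldl pvAddList [] V = pvRowsRec V := by
  induction V using List.reverseRecOn with
  | nil => rw [List.foldl_nil, pvRowsRec_neg _ (by simp)]
  | append_singleton P l ih =>
      rw [List.foldl_append, List.foldl_cons, List.foldl_nil, ih, pvAddList_eq]
      exact pvMerge_rowsRec l P

-- B's dedup double loop is the dedup fold over the flattened buckets
theorem pvDedup_flatten (buckets : List (List String)) :
    ∀ acc : PySem.Set String × List String,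
    List.foldl (fun acc bucket =>
      List.foldl (fun (acc : PySem.Set String × List String) url =>
        if (url != "") && !(PySem.Set.contains acc.1 url) then
          (PySem.Set.add acc.1 url, acc.2 ++ [url])
        else acc) acc bucket) acc buckets
      = List.foldl pvDStep acc buckets.flatten := by
  induction buckets with
  | nil => intro acc; rfl
  | cons b rest ih =>
      intro acc
      rw [List.foldl_cons, List.flatten_cons, List.foldl_append, ih]
      rfl

-- ===== VERDICT (by name: the statement is the Claim_ definition above) =====
theorem merge_parallel_unique_spec : Claim_equal_merge_parallel_unique := by
  intro all_urls _
  show merge_parallel_unique all_urls = merge_parallel_unique_alt all_urls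
  unfold merge_parallel_unique merge_parallel_unique_alt
  simp only [List.map_id']
  rw [pvLoopA_eq _ _ _ _ (Nat.lt_succ_self _), pvBuckets_eq, pvDedup_flatten]
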